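-- pv_equiv track=rewrite | github.com/Tymass/chess-player | main.py | divide_points_into_rows
-- ===== SOURCE A (Python) =====
-- def divide_points_into_rows(points: list, threshold: int) -> list:
--     '''
--         Group points into rows based on y-coordinates difference.
--     '''
--     # Sort points based on y-coordinate
--     sorted_points = sorted(points, key=lambda point: point[1])
--
--     rows = []
--     current_row = [sorted_points[0]]
--
--     for i in range(1, len(sorted_points)):
--         # Check if the y-coordinate difference between current point and last point in current row is less than threshold
--         if abs(sorted_points[i][1] - current_row[-1][1]) <= threshold:
--             current_row.append(sorted_points[i])
--         else:
--             rows.append(current_row)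
--             current_row = [sorted_points[i]]
--
--     # Add the last row
--     rows.append(current_row)
--     return rows
-- ===== SOURCE B (Python) =====
-- def divide_points_into_rows(points: list, threshold: int) -> list:
--     # Two-phase: find break positions in the y-sorted list, then cut it into slices.
--     sp = sorted(points, key=lambda p: p[1])
--     n = len(sp)
--     breaks = [i for i in range(1, n) if abs(sp[i][1] - sp[i - 1][1]) > threshold]
--     bounds = [0] + breaks + [n]
--     return [sp[a:b] for a, b in zip(bounds, bounds[1:])]
-- ===== Notes on version B (the rewrite author's own statement) =====
-- stated objective: alternative
-- what changed: Replaces A's single accumulating loop (growing current_row and flushing it into rows) by a two-phase decomposition: first compute the list of break indices where the adjacent y-gap exceeds the threshold, then cut the sorted list into contiguous slices at those bounds.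
import Mathlib
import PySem

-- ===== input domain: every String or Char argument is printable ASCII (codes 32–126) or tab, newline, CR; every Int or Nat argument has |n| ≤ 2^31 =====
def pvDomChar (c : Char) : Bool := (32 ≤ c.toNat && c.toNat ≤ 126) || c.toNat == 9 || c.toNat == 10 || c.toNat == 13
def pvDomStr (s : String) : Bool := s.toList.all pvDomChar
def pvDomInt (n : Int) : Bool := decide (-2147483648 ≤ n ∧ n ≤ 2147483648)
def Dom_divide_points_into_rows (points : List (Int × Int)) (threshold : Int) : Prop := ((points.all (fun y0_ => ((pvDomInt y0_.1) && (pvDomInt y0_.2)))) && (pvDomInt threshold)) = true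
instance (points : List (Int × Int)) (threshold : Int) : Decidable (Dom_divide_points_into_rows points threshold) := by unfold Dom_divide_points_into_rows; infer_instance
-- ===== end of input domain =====

-- B replaces A's accumulating loop by a two-phase "find break indices, then slice" decomposition
-- (alternative decomposition, same cost); equivalence is proved for nonempty point lists (A raises IndexError on []).

-- ===== PORT A =====
-- the for-loop of A: state (rows, current_row), one step per remaining sorted point
def pvALoop (t : Int) (rows : List (List (Int × Int))) (cur : List (Int × Int)) :
    List (Int × Int) → List (List (Int × Int))
  | [] => rows ++ [cur]
  | x :: rest =>
      if |x.2 - (PySem.List.pyGetD cur (-1) (0, 0)).2| ≤ t then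
        pvALoop t rows (cur ++ [x]) rest
      else
        pvALoop t (rows ++ [cur]) [x] rest

def divide_points_into_rows (points : List (Int × Int)) (threshold : Int) : List (List (Int × Int)) :=
  let sp := PySem.List.sorted points (fun p => p.2) false
  match sp with
  | [] => []  -- Python raises IndexError here (sorted_points[0]); excluded by Pre_
  | p :: rest => pvALoop threshold [] [p] rest

-- ===== PORT B =====
def divide_points_into_rows_alt (points : List (Int × Int)) (threshold : Int) : List (List (Int × Int)) :=
  let sp := PySem.List.sorted points (fun p => p.2) false
  let n : Int := sp.length
  let breaks := (PySem.List.pyRange 1 n 1).filter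
      (fun i => decide (threshold < |(PySem.List.pyGetD sp i (0, 0)).2 - (PySem.List.pyGetD sp (i - 1) (0, 0)).2|))
  let bounds := (0 : Int) :: (breaks ++ [n])
  (bounds.zip bounds.tail).map (fun ab => PySem.List.slice sp (some ab.1) (some ab.2))

-- ===== PRECONDITION & SPEC =====
-- Pre_ excludes exactly the empty list, on which A raises IndexError at sorted_points[0].
def Pre_divide_points_into_rows (points : List (Int × Int)) (threshold : Int) : Prop := points ≠ []
instance (points : List (Int × Int)) (threshold : Int) : Decidable (Pre_divide_points_into_rows points threshold) := by unfold Pre_divide_points_into_rows; infer_instance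

def pvWitness_divide_points_into_rows : (List (Int × Int)) × Int := ([(1, 2), (3, 10)], 4)

def Spec_divide_points_into_rows (points : List (Int × Int)) (threshold : Int) (out : List (List (Int × Int))) : Prop := out = divide_points_into_rows_alt points threshold
instance (points : List (Int × Int)) (threshold : Int) (out : List (List (Int × Int))) : Decidable (Spec_divide_points_into_rows points threshold out) := by unfold Spec_divide_points_into_rows; infer_instance

-- ===== CLAIM (what is proved, stated in full; the proofs are below) =====
def Claim_equal_divide_points_into_rows : Prop := ∀ (points : List (Int × Int)) (threshold : Int), Dom_divide_points_into_rows points threshold → Pre_divide_points_into_rows points threshold → Spec_divide_points_into_rows points threshold (divide_points_into_rows points threshold)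

-- ===== LEMMAS AND PROOFS =====

-- proof-side characterisation: given the previous point z, split the remaining points into
-- (continuation of the current run, the later groups)
def pvGrp (t : Int) : (Int × Int) → List (Int × Int) → List (Int × Int) × List (List (Int × Int))
  | _, [] => ([], [])
  | z, x :: rest =>
      let p := pvGrp t x rest
      if |x.2 - z.2| ≤ t then (x :: p.1, p.2) else ([], (x :: p.1) :: p.2)

-- proof-side characterisation of B's break-index list, at offset k with previous point z
def pvBrk (t : Int) : Int → (Int × Int) → List (Int × Int) → List Int
  | _, _, [] => []
  | k, z, x :: rest =>
      if |x.2 - z.2| ≤ t then pvBrk t (k + 1) x rest else k :: pvBrk t (k + 1) x rest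

theorem pvALoop_eq (t : Int) :
    ∀ (rest : List (Int × Int)) (rows : List (List (Int × Int))) (cur : List (Int × Int)) (x : Int × Int),
      pvALoop t rows (cur ++ [x]) rest
        = rows ++ ((cur ++ [x]) ++ (pvGrp t x rest).1) :: (pvGrp t x rest).2 := by
  intro rest
  induction rest with
  | nil => intro rows cur x; simp [pvALoop, pvGrp]
  | cons y rest ih =>
      intro rows cur x
      simp only [pvALoop, PySem.List.pyGetD_neg_one_append_singleton, pvGrp]
      by_cases h : |y.2 - x.2| ≤ t
      · rw [if_pos h, if_pos h]
        have := ih rows (cur ++ [x]) y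
        simp only [List.append_assoc, List.cons_append] at this ⊢
        exact this
      · rw [if_neg h, if_neg h]
        have := ih (rows ++ [cur ++ [x]]) [] y
        simp only [List.nil_append, List.append_assoc, List.cons_append] at this ⊢
        exact this

theorem pvBrk_eq (t : Int) (sp : List (Int × Int)) :
    ∀ (rest : List (Int × Int)) (k : Nat) (z : Int × Int),
      sp.drop k = rest → 0 < k → sp[k - 1]? = some z →
      (PySem.List.pyRange (k : Int) (sp.length : Int) 1).filter
          (fun i => decide (t < |(PySem.List.pyGetD sp i (0, 0)).2 - (PySem.List.pyGetD sp (i - 1) (0, 0)).2|))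
        = pvBrk t (k : Int) z rest := by
  intro rest
  induction rest with
  | nil =>
      intro k z hdrop hk hz
      have hlen : sp.length ≤ k := by
        by_contra h
        have : sp.drop k ≠ [] := by
          simp [List.drop_eq_nil_iff]; omega
        exact this hdrop
      rw [PySem.List.pyRange_one_eq_nil (by exact_mod_cast hlen)]
      simp [pvBrk]
  | cons x rest ih =>
      intro k z hdrop hk hz
      have hklt : k < sp.length := by
        by_contra h
        rw [List.drop_eq_nil_of_le (by omega)] at hdrop
        simp at hdrop
      have hx : sp[k]? = some x := by
        have h0 : (sp.drop k)[0]? = some x := by rw [hdrop]; rfl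
        rw [List.getElem?_drop] at h0
        simpa using h0
      have hdrop' : sp.drop (k + 1) = rest := by
        have h1 := congrArg (List.drop 1) hdrop
        rw [List.drop_drop] at h1
        simpa using h1
      rw [PySem.List.pyRange_one_cons (by exact_mod_cast hklt)]
      rw [List.filter_cons]
      have hgk : PySem.List.pyGetD sp (k : Int) (0, 0) = x := by
        rw [PySem.List.pyGetD_natCast]
        simpa [List.getD, hx] using rfl
      have hgk1 : PySem.List.pyGetD sp ((k : Int) - 1) (0, 0) = z := by
        have : (k : Int) - 1 = ((k - 1 : Nat) : Int) := by omega
        rw [this, PySem.List.pyGetD_natCast]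
        simpa [List.getD, hz] using rfl
      have ihk := ih (k + 1) x hdrop' (by omega) (by simpa using hx)
      have hcast : ((k + 1 : Nat) : Int) = (k : Int) + 1 := by push_cast; ring
      rw [hcast] at ihk
      simp only [hgk, hgk1]
      by_cases h : |x.2 - z.2| ≤ t
      · rw [if_neg (by simp; omega)]
        rw [ihk]
        simp [pvBrk, h]
      · rw [if_pos (by simp; omega)]
        rw [ihk]
        simp [pvBrk, h]

theorem pvSlices_eq (t : Int) (sp : List (Int × Int)) :
    ∀ (rest : List (Int × Int)) (a k : Nat) (z : Int × Int),
      sp.drop k = rest → a ≤ k →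
      (((a : Int) :: (pvBrk t (k : Int) z rest ++ [(sp.length : Int)])).zip
          ((pvBrk t (k : Int) z rest ++ [(sp.length : Int)]))).map
          (fun ab => PySem.List.slice sp (some ab.1) (some ab.2))
        = ((sp.drop a).take (k - a) ++ (pvGrp t z rest).1) :: (pvGrp t z rest).2 := by
  intro rest
  induction rest with
  | nil =>
      intro a k z hdrop ha
      have hlen : sp.length ≤ k := by
        by_contra h
        have : sp.drop k ≠ [] := by simp [List.drop_eq_nil_iff]; omega
        exact this hdrop
      simp only [pvBrk, pvGrp, List.nil_append, List.zip_cons_cons, List.zip_nil_right,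
        List.map_cons, List.map_nil, List.append_nil]
      rw [PySem.List.slice_natCast]
      congr 1
      have h1 : (sp.drop a).length = sp.length - a := by simp
      rw [List.take_of_length_le (by omega), List.take_of_length_le (by omega)]
  | cons x rest ih =>
      intro a k z hdrop ha
      have hklt : k < sp.length := by
        by_contra h
        rw [List.drop_eq_nil_of_le (by omega)] at hdrop
        simp at hdrop
      have hx : sp[k]? = some x := by
        have h0 : (sp.drop k)[0]? = some x := by rw [hdrop]; rfl
        rw [List.getElem?_drop] at h0
        simpa using h0
      have hdrop' : sp.drop (k + 1) = rest := by
        have h1 := congrArg (List.drop 1) hdrop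
        rw [List.drop_drop] at h1
        simpa using h1
      have hcast : ((k + 1 : Nat) : Int) = (k : Int) + 1 := by push_cast; ring
      simp only [pvBrk, pvGrp]
      by_cases h : |x.2 - z.2| ≤ t
      · rw [if_pos h, if_pos h]
        have ihk := ih a (k + 1) x hdrop' (by omega)
        rw [hcast] at ihk
        have h2 : k + 1 - a = (k - a) + 1 := by omega
        have h3 : (sp.drop a)[k - a]? = some x := by
          rw [List.getElem?_drop]
          have hak : a + (k - a) = k := by omega
          rw [hak]; exact hx
        have h4 : List.take (k + 1 - a) (List.drop a sp)
            = List.take (k - a) (List.drop a sp) ++ [x] := by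
          rw [h2, List.take_add_one, h3]; rfl
        rw [ihk, h4]
        simp
      · rw [if_neg h, if_neg h]
        have ihk := ih k (k + 1) x hdrop' (by omega)
        rw [hcast] at ihk
        simp only [List.cons_append, List.zip_cons_cons, List.map_cons] at ihk ⊢
        rw [ihk]
        rw [PySem.List.slice_natCast]
        congr 2
        · simp
        · have : sp.drop k = x :: rest := hdrop
          rw [Nat.add_sub_cancel_left, this]
          simp

-- ===== VERDICT (by name: the statement is the Claim_ definition above) =====
theorem divide_points_into_rows_spec : Claim_equal_divide_points_into_rows := by
  intro points threshold _ hpre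
  unfold Spec_divide_points_into_rows divide_points_into_rows divide_points_into_rows_alt
  have hne : PySem.List.sorted points (fun p => p.2) false ≠ [] := by
    rw [Ne, PySem.List.sorted_eq_nil_iff]
    exact hpre
  obtain ⟨p, rest, hsp⟩ : ∃ p rest, PySem.List.sorted points (fun p => p.2) false = p :: rest := by
    cases h : PySem.List.sorted points (fun p => p.2) false with
    | nil => exact absurd h hne
    | cons p rest => exact ⟨p, rest, rfl⟩
  simp only [hsp]
  have hA := pvALoop_eq threshold rest [] [] p
  simp only [List.nil_append] at hA
  rw [hA]
  have hB := pvBrk_eq threshold (p :: rest) rest 1 p (by rfl) (by omega) (by rfl)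
  have hcast1 : ((1 : Nat) : Int) = 1 := rfl
  rw [hcast1] at hB
  rw [hB]
  have hS := pvSlices_eq threshold (p :: rest) rest 0 1 p (by rfl) (by omega)
  rw [hcast1, Nat.cast_zero] at hS
  simp only [List.tail_cons]
  rw [hS]
  simp
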